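-- pv_equiv track=rewrite | github.com/ImJ9y/Deception_Detection | scripts/eval/run_eval_pipeline.py | replace_prompt_variant
-- ===== SOURCE A (Python) =====
-- def replace_prompt_variant(run_name: str, variant: str) -> str:
--     parts = str(run_name).split("_")
--     for i, part in enumerate(parts):
--         lower = part.lower()
--         if lower == "zs" or lower.startswith("fs"):
--             out = list(parts)
--             out[i] = variant
--             return "_".join(out)
--     return ""
-- ===== SOURCE B (Python) =====
-- def replace_prompt_variant(run_name: str, variant: str) -> str:
--     def go(parts):
--         if not parts:
--             return None
--         head, tail = parts[0], parts[1:]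
--         lw = head.lower()
--         if lw == "zs" or lw.startswith("fs"):
--             return [variant] + tail
--         rest = go(tail)
--         return None if rest is None else [head] + rest
--     res = go(str(run_name).split("_"))
--     return "" if res is None else "_".join(res)
-- ===== Notes on version B (the rewrite author's own statement) =====
-- stated objective: alternative
-- what changed: Replaces A's index loop with enumerate plus copy-and-set of the full parts list by a structural recursion over the token list that returns None or the rebuilt list with the first matching token replaced.
import Mathlib
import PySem

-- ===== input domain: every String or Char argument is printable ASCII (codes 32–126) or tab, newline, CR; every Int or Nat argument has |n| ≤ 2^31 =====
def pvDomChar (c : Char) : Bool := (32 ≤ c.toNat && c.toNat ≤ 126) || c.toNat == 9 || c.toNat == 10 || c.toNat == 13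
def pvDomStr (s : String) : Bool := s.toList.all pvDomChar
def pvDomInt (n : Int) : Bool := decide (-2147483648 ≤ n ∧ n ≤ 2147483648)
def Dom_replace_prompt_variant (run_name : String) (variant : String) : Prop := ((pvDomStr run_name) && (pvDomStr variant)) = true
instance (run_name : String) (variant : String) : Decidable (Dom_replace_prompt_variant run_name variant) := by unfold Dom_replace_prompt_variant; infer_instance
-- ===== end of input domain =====

-- B replaces A's index loop + copy-and-set + rejoin by a single structural recursion that
-- rebuilds the token list (Option = no match); objective: alternative decomposition, same cost.


-- ===== PORT A =====
-- A's for-loop over enumerate(parts): index i, remaining tokens `rest`; on a match it copies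
-- `parts`, overwrites slot i with the variant and joins; after the loop it returns "".
def pvALoop (variant : List Char) (parts : List (List Char)) :
    Nat → List (List Char) → List Char
  | _, [] => []
  | i, p :: rest =>
    let lower := PySem.Chars.lower p
    if lower = ['z', 's'] ∨ PySem.Chars.startswith lower ['f', 's'] then
      PySem.Chars.join ['_'] (parts.set i variant)
    else
      pvALoop variant parts (i + 1) rest

def replace_prompt_variant (run_name : String) (variant : String) : String :=
  let parts := PySem.Chars.splitOn run_name.toList ['_']
  String.ofList (pvALoop variant.toList parts 0 parts)

-- ===== PORT B =====
-- B's recursive helper `go`: none = no variant token; some l = token list with the first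
-- matching token replaced, rebuilt front-to-back on the way out of the recursion.
def pvBGo (variant : List Char) : List (List Char) → Option (List (List Char))
  | [] => none
  | p :: t =>
    let lw := PySem.Chars.lower p
    if lw = ['z', 's'] ∨ PySem.Chars.startswith lw ['f', 's'] then
      some (variant :: t)
    else
      (pvBGo variant t).map (p :: ·)

def replace_prompt_variant_alt (run_name : String) (variant : String) : String :=
  match pvBGo variant.toList (PySem.Chars.splitOn run_name.toList ['_']) with
  | none => ""
  | some l => String.ofList (PySem.Chars.join ['_'] l)

-- ===== PRECONDITION & SPEC =====
def Spec_replace_prompt_variant (run_name : String) (variant : String) (out : String) : Prop := out = replace_prompt_variant_alt run_name variant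
instance (run_name : String) (variant : String) (out : String) : Decidable (Spec_replace_prompt_variant run_name variant out) := by unfold Spec_replace_prompt_variant; infer_instance

-- ===== CLAIM (what is proved, stated in full; the proofs are below) =====
def Claim_equal_replace_prompt_variant : Prop := ∀ (run_name : String) (variant : String), Dom_replace_prompt_variant run_name variant → Spec_replace_prompt_variant run_name variant (replace_prompt_variant run_name variant)

-- ===== LEMMAS AND PROOFS =====
-- Loop invariant: with i = pre.length and parts = pre ++ rest, A's loop over `rest` returns
-- exactly what B's `go rest` describes, with the untouched prefix `pre` glued back on.
theorem pvLoop_eq_go (variant : List Char) :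
    ∀ (rest pre : List (List Char)),
      pvALoop variant (pre ++ rest) pre.length rest =
        (match pvBGo variant rest with
         | none => []
         | some l => PySem.Chars.join ['_'] (pre ++ l)) := by
  intro rest
  induction rest with
  | nil => intro pre; simp [pvALoop, pvBGo]
  | cons p t ih =>
    intro pre
    by_cases h : PySem.Chars.lower p = ['z', 's'] ∨
        PySem.Chars.startswith (PySem.Chars.lower p) ['f', 's']
    · simp [pvALoop, pvBGo, h]
    · have hrw : pre ++ p :: t = (pre ++ [p]) ++ t := by simp
      have hlen : pre.length + 1 = (pre ++ [p]).length := by simp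
      rw [pvALoop, if_neg h, hrw, hlen, ih (pre ++ [p])]
      rw [pvBGo, if_neg h]
      cases pvBGo variant t with
      | none => simp
      | some l => simp

-- ===== VERDICT (by name: the statement is the Claim_ definition above) =====
theorem replace_prompt_variant_spec : Claim_equal_replace_prompt_variant := by
  intro run_name variant _
  unfold Spec_replace_prompt_variant replace_prompt_variant replace_prompt_variant_alt
  simp only []
  have h := pvLoop_eq_go variant.toList (PySem.Chars.splitOn run_name.toList ['_']) []
  simp only [List.nil_append, List.length_nil] at h
  rw [h]
  cases pvBGo variant.toList (PySem.Chars.splitOn run_name.toList ['_']) with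
  | none => rfl
  | some l => rfl
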